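-- pv_equiv track=rewrite | github.com/phatakshaunak/scaler_academy | DSA_Problem_Solving/Tries/spell_checker.py | solve
-- ===== SOURCE A (Python) =====
-- def solve(A, B):
--
--     # Create a trie with the dictionary words. Then iterate and check all the given words
--     dummy = TrieNode('dummy')
--     # Loop over the dictionary words
--     for word in A:
--         root = dummy
--         # Loop over characters
--         for char in word:
--             if char in root.children:
--                 # If character is present, point root to that character
--                 root = root.children[char]
--                 # Increment counter for the root node
--                 root.prefix_count += 1
--             else:
--                 # Add a new TrieNode for the new character to root's children and increment it's counter
--                 new_node = TrieNode(char)
--                 new_node.prefix_count += 1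
--                 root.children[char] = new_node
--                 root = root.children[char]
--         root.isEnd = True
--
--     # Now we need to check if the given words are present in the dictionary.
--     # Two failing cases, the word is present but the isEnd for last character is not True
--     # Second, all the characters in the word are not present
--
--     ans = []
--     for word in B:
--         early_flag = False
--         # Start at the dummy node
--         root = dummy
--         # Loop over the words characters
--         for char in word:
--             # If character is not present, break out and add zero to answer
--             if char not in root.children:
--                 ans.append(0)
--                 early_flag = True
--                 break
--             else:
--                 # Move to the next character
--                 root = root.children[char]
--
--         # Once out, check if early flag is False (i.e. all characters are present, then see if isEnd is True)
--         if not early_flag: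
--             if root.isEnd:
--                 # Word is present in the dictionary
--                 ans.append(1)
--             else:
--                 ans.append(0)
--
--     return ans
--
-- class TrieNode:
--     def __init__(self, char):
--         self.char = char
--         self.isEnd = False
--         self.children = dict()
--         self.prefix_count = 0
-- ===== SOURCE B (Python) =====
-- def solve(A, B):
--     s = set(A)
--     return [1 if w in s else 0 for w in B]
-- ===== Notes on version B (the rewrite author's own statement) =====
-- stated objective: simpler
-- what changed: Replaced the hand-built character trie (TrieNode class, per-character insert and lookup loops) by whole-word hash-set membership: build set(A) once and emit 1/0 per word of B with a comprehension.
import Mathlib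
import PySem

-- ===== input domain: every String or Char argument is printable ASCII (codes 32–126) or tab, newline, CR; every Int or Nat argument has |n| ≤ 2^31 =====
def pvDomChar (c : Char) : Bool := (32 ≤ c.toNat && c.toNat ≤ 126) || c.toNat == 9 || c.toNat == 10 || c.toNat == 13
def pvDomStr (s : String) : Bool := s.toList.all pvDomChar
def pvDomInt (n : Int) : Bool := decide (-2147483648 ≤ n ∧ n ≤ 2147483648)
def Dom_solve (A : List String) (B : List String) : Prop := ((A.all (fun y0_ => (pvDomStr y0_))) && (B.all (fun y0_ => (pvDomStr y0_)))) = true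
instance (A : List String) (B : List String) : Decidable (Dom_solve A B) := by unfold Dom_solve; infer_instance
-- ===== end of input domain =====

-- B replaces A's character-level trie by whole-word set membership (simpler; same result).

-- ===== PORT A =====
-- TrieNode: char, isEnd, prefix_count, children (dict Char -> TrieNode, as an
-- insertion-ordered assoc structure; mutual pair since a nested inductive is not allowed)
mutual
inductive Trie where
  | mk : String → Bool → Int → Children → Trie
inductive Children where
  | nil : Children
  | cons : Char → Trie → Children → Children
end

-- 'char in root.children' / 'root.children[char]' : first-match dict lookup
def childGet : Children → Char → Option Trie
  | .nil, _ => none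
  | .cons c t r, d => if d = c then some t else childGet r d

-- 'root.children[char] = node' : dict overwrite-in-place (or append if absent)
def childSet : Children → Char → Trie → Children
  | .nil, c, t => .cons c t .nil
  | .cons c' t' r, c, t => if c' = c then .cons c' t r else .cons c' t' (childSet r c t)

-- 'node.prefix_count += 1'
def incCount : Trie → Trie
  | .mk s e p ch => .mk s e (p + 1) ch

-- the inner 'for char in word' insertion loop of A, following the mutated path recursively;
-- at the end of the word 'root.isEnd = True'
def insertWord : Trie → List Char → Trie
  | .mk s _ p ch, [] => .mk s true p ch
  | .mk s e p ch, c :: cs =>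
    match childGet ch c with
    | some child => .mk s e p (childSet ch c (insertWord (incCount child) cs))
    | none => .mk s e p (childSet ch c (insertWord (incCount (.mk (String.mk [c]) false 0 .nil)) cs))

-- the query loop over one word of B: 0 on a missing character (early break),
-- else 1/0 from isEnd at the last character
def queryWord : Trie → List Char → Int
  | .mk _ e _ _, [] => if e then 1 else 0
  | .mk _ _ _ ch, c :: cs =>
    match childGet ch c with
    | none => 0
    | some child => queryWord child cs

def solve (A : List String) (B : List String) : List Int :=
  let trie := A.foldl (fun root w => insertWord root w.toList) (Trie.mk "dummy" false 0 .nil)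
  B.foldl (fun ans w => ans ++ [queryWord trie w.toList]) []

-- ===== PORT B =====
def solve_alt (A : List String) (B : List String) : List Int :=
  let s : PySem.Set String := PySem.Set.ofList A
  B.map (fun w => if PySem.Set.contains s w then 1 else 0)

-- ===== PRECONDITION & SPEC =====
def Spec_solve (A : List String) (B : List String) (out : List Int) : Prop := out = solve_alt A B
instance (A : List String) (B : List String) (out : List Int) : Decidable (Spec_solve A B out) := by unfold Spec_solve; infer_instance

-- ===== CLAIM (what is proved, stated in full; the proofs are below) =====
def Claim_equal_solve : Prop := ∀ (A : List String) (B : List String), Dom_solve A B → Spec_solve A B (solve A B)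

-- ===== LEMMAS AND PROOFS =====

theorem childGet_childSet : ∀ (l : Children) (c d : Char) (t : Trie),
    childGet (childSet l c t) d = if d = c then some t else childGet l d
  | .nil, c, d, t => by simp [childSet, childGet]
  | .cons c' t' r, c, d, t => by
    simp only [childSet]
    by_cases h : c' = c
    · subst h
      simp only [if_pos rfl, childGet]
      by_cases hd : d = c' <;> simp [childGet, hd]
    · simp only [if_neg h, childGet]
      by_cases hd : d = c'
      · subst hd; simp [childGet, h]
      · simp [childGet, hd, childGet_childSet r c d t]

theorem queryWord_incCount (t : Trie) (ds : List Char) :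
    queryWord (incCount t) ds = queryWord t ds := by
  cases t with
  | mk s e p ch => cases ds <;> simp [incCount, queryWord]

theorem queryWord_insertWord (cs : List Char) (t : Trie) (ds : List Char) :
    queryWord (insertWord t cs) ds = if ds = cs then 1 else queryWord t ds := by
  induction cs generalizing t ds with
  | nil =>
    cases t with
    | mk s e p ch =>
      cases ds with
      | nil => simp [insertWord, queryWord]
      | cons d ds' => simp [insertWord, queryWord]
  | cons c cs' ih =>
    cases t with
    | mk s e p ch =>
      cases hg : childGet ch c with
      | some child =>
        cases ds with
        | nil => simp [insertWord, hg, queryWord]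
        | cons d ds' =>
          simp only [insertWord, hg, queryWord, childGet_childSet]
          by_cases hd : d = c
          · subst hd
            by_cases he : ds' = cs'
            · simp [he, ih, queryWord_incCount]
            · simp [he, ih, queryWord_incCount, hg]
          · have hne : ¬ (d :: ds' = c :: cs') := by simp [hd]
            simp [hd, hne]
      | none =>
        cases ds with
        | nil => simp [insertWord, hg, queryWord]
        | cons d ds' =>
          simp only [insertWord, hg, queryWord, childGet_childSet]
          by_cases hd : d = c
          · subst hd
            by_cases he : ds' = cs'
            · simp [he, ih, queryWord_incCount]
            · simp only [ih, queryWord_incCount, he, if_neg, List.cons.injEq, and_false,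
                if_false, if_true, true_and, hg]
              cases ds' with
              | nil => simp [he, queryWord, incCount]
              | cons x xs => simp [he, queryWord, childGet]
          · have hne : ¬ (d :: ds' = c :: cs') := by simp [hd]
            simp [hd, hne]

theorem queryWord_foldl (ws : List String) (t : Trie) (ds : List Char) :
    queryWord (ws.foldl (fun root w => insertWord root w.toList) t) ds =
      if ds ∈ ws.map String.toList then 1 else queryWord t ds := by
  induction ws generalizing t with
  | nil => simp
  | cons w ws' ih =>
    simp only [List.foldl_cons, ih, List.map_cons, List.mem_cons, queryWord_insertWord]
    by_cases hm : ds ∈ ws'.map String.toList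
    · simp [hm]
    · by_cases he : ds = w.toList
      · simp [he]
      · simp [hm, he]

theorem queryWord_root (ds : List Char) :
    queryWord (Trie.mk "dummy" false 0 .nil) ds = 0 := by
  cases ds <;> simp [queryWord, childGet]

theorem foldl_append_singleton (f : String → Int) (l : List String) (init : List Int) :
    l.foldl (fun ans w => ans ++ [f w]) init = init ++ l.map f := by
  induction l generalizing init with
  | nil => simp
  | cons x xs ih => simp [ih]

-- ===== VERDICT (by name: the statement is the Claim_ definition above) =====
theorem solve_spec : Claim_equal_solve := by
  intro A B _
  unfold Spec_solve solve solve_alt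
  rw [foldl_append_singleton (fun w => queryWord (A.foldl (fun root w => insertWord root w.toList) (Trie.mk "dummy" false 0 .nil)) w.toList) B []]
  simp only [List.nil_append]
  apply List.map_congr_left
  intro w _
  rw [queryWord_foldl, queryWord_root]
  have hmem : (w.toList ∈ A.map String.toList) ↔ w ∈ A := by
    simp only [List.mem_map, String.toList_inj]
    exact ⟨fun ⟨a, ha, he⟩ => he ▸ ha, fun h => ⟨w, h, rfl⟩⟩
  have hc : (PySem.Set.contains (PySem.Set.ofList A) w = true) ↔ w ∈ A := by
    rw [PySem.Set.contains_iff, PySem.Set.mem_ofList]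
  by_cases h : w ∈ A
  · rw [if_pos (hmem.mpr h), if_pos (hc.mpr h)]
  · rw [if_neg (fun hh => h (hmem.mp hh)), if_neg (fun hh => h (hc.mp hh))]
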